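-- pv_equiv track=rewrite | github.com/yragurman/algorithms_lab_3 | main.py | count_wedding_pairs
-- ===== SOURCE A (Python) =====
-- def count_boys_and_girls_inClan(clan):
--     girls = 0
--     boys = 0
--     for human in clan:
--         if human % 2 == 0:
--             girls += 1
--         else:
--             boys += 1
--     return girls, boys
--
-- def count_wedding_pairs(clans):
--     boys = 0
--     girls = 0
--     sum_impossible_pair = 0
--     for clan in clans:
--         sum_girl_in_one_clan, sum_boys_in_one_clan = count_boys_and_girls_inClan(clan)
--         boys += sum_boys_in_one_clan
--         girls += sum_girl_in_one_clan
--         sum_impossible_pair += sum_boys_in_one_clan * sum_girl_in_one_clan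
--     return boys * girls - sum_impossible_pair
-- ===== SOURCE B (Python) =====
-- def count_wedding_pairs(clans):
--     boys_seen = 0
--     girls_seen = 0
--     ans = 0
--     for clan in clans:
--         boys_c = sum(h % 2 for h in clan)
--         girls_c = len(clan) - boys_c
--         ans += boys_c * girls_seen + girls_c * boys_seen
--         boys_seen += boys_c
--         girls_seen += girls_c
--     return ans
-- ===== Notes on version B (the rewrite author's own statement) =====
-- stated objective: alternative
-- what changed: Instead of total_boys*total_girls minus the sum of per-clan boys*girls, B accumulates cross-clan pairs directly: for each clan it adds boys_c*girls_seen + girls_c*boys_seen against the running totals of earlier clans, and counts a clan's boys as the sum of parities h % 2 rather than branch-counting.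
import Mathlib
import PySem

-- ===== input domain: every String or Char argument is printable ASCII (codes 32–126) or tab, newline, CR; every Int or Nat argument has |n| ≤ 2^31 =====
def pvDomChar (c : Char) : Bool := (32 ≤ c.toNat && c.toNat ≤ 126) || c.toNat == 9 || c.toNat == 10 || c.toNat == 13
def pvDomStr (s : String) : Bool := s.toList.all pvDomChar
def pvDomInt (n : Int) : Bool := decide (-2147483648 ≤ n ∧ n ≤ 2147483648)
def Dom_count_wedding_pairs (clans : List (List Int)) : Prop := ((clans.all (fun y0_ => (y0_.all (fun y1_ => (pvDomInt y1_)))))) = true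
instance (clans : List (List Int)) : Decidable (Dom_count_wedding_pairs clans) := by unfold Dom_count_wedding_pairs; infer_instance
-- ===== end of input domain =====

-- B accumulates cross-clan pairs against running prefix totals instead of A's global product minus per-clan products; alternative decomposition, same cost.

-- ===== PORT A =====
-- helper: count_boys_and_girls_inClan — returns (girls, boys)
def count_boys_and_girls_inClan (clan : List Int) : Int × Int :=
  clan.foldl
    (fun (st : Int × Int) human =>
      if PySem.Int.mod human 2 = 0 then (st.1 + 1, st.2) else (st.1, st.2 + 1))
    (0, 0)

def count_wedding_pairs (clans : List (List Int)) : Int :=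
  let st := clans.foldl
    (fun (st : Int × Int × Int) clan =>
      let gb := count_boys_and_girls_inClan clan
      (st.1 + gb.2, st.2.1 + gb.1, st.2.2 + gb.2 * gb.1))
    (0, 0, 0)
  st.1 * st.2.1 - st.2.2

-- ===== PORT B =====
-- boys in a clan = sum of parities h % 2
def clan_boys (clan : List Int) : Int :=
  clan.foldl (fun acc h => acc + PySem.Int.mod h 2) 0

-- state: (boys_seen, girls_seen, ans)
def count_wedding_pairs_alt (clans : List (List Int)) : Int :=
  (clans.foldl
    (fun (st : Int × Int × Int) clan =>
      let boys_c := clan_boys clan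
      let girls_c := (clan.length : Int) - boys_c
      (st.1 + boys_c, st.2.1 + girls_c,
        st.2.2 + boys_c * st.2.1 + girls_c * st.1))
    (0, 0, 0)).2.2

-- ===== PRECONDITION & SPEC =====
def Spec_count_wedding_pairs (clans : List (List Int)) (out : Int) : Prop := out = count_wedding_pairs_alt clans
instance (clans : List (List Int)) (out : Int) : Decidable (Spec_count_wedding_pairs clans out) := by unfold Spec_count_wedding_pairs; infer_instance

-- ===== CLAIM (what is proved, stated in full; the proofs are below) =====
def Claim_equal_count_wedding_pairs : Prop := ∀ (clans : List (List Int)), Dom_count_wedding_pairs clans → Spec_count_wedding_pairs clans (count_wedding_pairs clans)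

-- ===== LEMMAS AND PROOFS =====

-- A's per-clan counter, from any accumulator: girls = length - boys, boys = clan_boys
lemma count_clan_eq (clan : List Int) (g0 b0 : Int) :
    clan.foldl
      (fun (st : Int × Int) human =>
        if PySem.Int.mod human 2 = 0 then (st.1 + 1, st.2) else (st.1, st.2 + 1))
      (g0, b0)
    = (g0 + ((clan.length : Int) - clan_boys clan), b0 + clan_boys clan) := by
  induction clan generalizing g0 b0 with
  | nil => simp [clan_boys]
  | cons h t ih =>
    have hmod := PySem.Int.mod_two_eq h
    have hboys : clan_boys (h :: t) = PySem.Int.mod h 2 + clan_boys t := by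
      simp [clan_boys, PySem.List.foldl_add]
    rcases hmod with h0 | h1
    · simp only [List.foldl_cons, h0, reduceIte, ih, hboys, List.length_cons]
      refine Prod.ext ?_ ?_ <;> simp <;> ring
    · have hne : ¬ PySem.Int.mod h 2 = 0 := by rw [h1]; decide
      simp only [List.foldl_cons, ih, hboys, h1, List.length_cons]
      refine Prod.ext ?_ ?_ <;> simp <;> ring

lemma main_invariant (clans : List (List Int)) (b g s ans : Int)
    (hinv : ans = b * g - s) :
    (clans.foldl
      (fun (st : Int × Int × Int) clan =>
        let boys_c := clan_boys clan
        let girls_c := (clan.length : Int) - boys_c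
        (st.1 + boys_c, st.2.1 + girls_c,
          st.2.2 + boys_c * st.2.1 + girls_c * st.1))
      (b, g, ans)).2.2
    =
    (let st := clans.foldl
      (fun (st : Int × Int × Int) clan =>
        let gb := count_boys_and_girls_inClan clan
        (st.1 + gb.2, st.2.1 + gb.1, st.2.2 + gb.2 * gb.1))
      (b, g, s)
    st.1 * st.2.1 - st.2.2) := by
  induction clans generalizing b g s ans with
  | nil => simpa using hinv
  | cons c t ih =>
    simp only [List.foldl_cons]
    have hc : count_boys_and_girls_inClan c
        = (((c.length : Int) - clan_boys c), clan_boys c) := by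
      have := count_clan_eq c 0 0
      simpa [count_boys_and_girls_inClan] using this
    rw [hc]
    apply ih
    subst hinv
    ring

theorem count_wedding_pairs_spec : Claim_equal_count_wedding_pairs := by
  intro clans _
  unfold Spec_count_wedding_pairs count_wedding_pairs count_wedding_pairs_alt
  exact (main_invariant clans 0 0 0 0 (by ring)).symm
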